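-- pv_equiv track=rewrite | github.com/trykvi/advent-of-code | AoC-2025/day3.py | part1
-- ===== SOURCE A (Python) =====
-- def part1(input):
--     banks = input.split("\n")
--     total_joltage = 0
--
--     for bank in banks:
--         first_battery = 0
--         first_battery_idx = 0
--
--         for i in range(len(bank)-1):
--             if(int(bank[i]) > first_battery):
--                 first_battery = int(bank[i])
--                 first_battery_idx = i
--
--         second_battery = 0
--
--         for i in range(first_battery_idx+1, len(bank)):
--             if(int(bank[i]) > second_battery):
--                 second_battery = int(bank[i])
--
--         total_joltage += int(str(first_battery) + str(second_battery))
--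
--     return total_joltage
-- ===== SOURCE B (Python) =====
-- def part1(input):
--     total_joltage = 0
--     for bank in input.split("\n"):
--         best = 0
--         for i in range(len(bank) - 1):
--             for j in range(i + 1, len(bank)):
--                 joltage = 10 * int(bank[i]) + int(bank[j])
--                 if joltage > best:
--                     best = joltage
--         total_joltage += best
--     return total_joltage
-- ===== Notes on version B (the rewrite author's own statement) =====
-- stated objective: alternative
-- what changed: Replaces A's greedy two-pass strategy per line (max digit over the prefix with its earliest index, then max digit after that index, concatenated via str+int) with a single brute-force maximum of 10*int(bank[i])+int(bank[j]) over all index pairs i<j.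
import Mathlib
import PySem

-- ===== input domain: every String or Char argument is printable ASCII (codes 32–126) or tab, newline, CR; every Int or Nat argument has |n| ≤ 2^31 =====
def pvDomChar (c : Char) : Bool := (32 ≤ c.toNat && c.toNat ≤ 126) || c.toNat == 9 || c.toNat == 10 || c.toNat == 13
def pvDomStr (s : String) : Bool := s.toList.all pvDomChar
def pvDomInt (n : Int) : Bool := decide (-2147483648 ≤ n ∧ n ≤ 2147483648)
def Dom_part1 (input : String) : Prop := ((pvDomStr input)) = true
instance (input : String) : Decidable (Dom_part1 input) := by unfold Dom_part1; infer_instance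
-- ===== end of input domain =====

-- B replaces A's two greedy passes (earliest max tens digit, then max of its suffix) by a
-- brute-force maximum over all index pairs i<j; alternative decomposition, same exact results.

-- ===== PORT A =====
def part1 (input : String) : Int :=
  let banks := (PySem.Str.split? input "\n").getD []
  banks.foldl (fun total_joltage bank =>
    let cs := bank.toList
    -- first loop: running (first_battery, first_battery_idx)
    let st := (PySem.List.pyRange 0 (PySem.List.len cs - 1) 1).foldl
      (fun (st : Int × Int) i =>
        let d := (PySem.Int.ofChars? [PySem.List.pyGetD cs i ' ']).getD 0
        if d > st.1 then (d, i) else st) (0, 0)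
    -- second loop: second_battery over indices after first_battery_idx
    let sb := (PySem.List.pyRange (st.2 + 1) (PySem.List.len cs) 1).foldl
      (fun sb i =>
        let d := (PySem.Int.ofChars? [PySem.List.pyGetD cs i ' ']).getD 0
        if d > sb then d else sb) 0
    total_joltage + (PySem.Int.ofStr? (PySem.Int.toStr st.1 ++ PySem.Int.toStr sb)).getD 0) 0

-- ===== PORT B =====
def part1_alt (input : String) : Int :=
  let banks := (PySem.Str.split? input "\n").getD []
  banks.foldl (fun total_joltage bank =>
    let cs := bank.toList
    let best := (PySem.List.pyRange 0 (PySem.List.len cs - 1) 1).foldl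
      (fun best i =>
        (PySem.List.pyRange (i + 1) (PySem.List.len cs) 1).foldl
          (fun best j =>
            let joltage := 10 * (PySem.Int.ofChars? [PySem.List.pyGetD cs i ' ']).getD 0
              + (PySem.Int.ofChars? [PySem.List.pyGetD cs j ' ']).getD 0
            if joltage > best then joltage else best) best) 0
    total_joltage + best) 0

-- ===== PRECONDITION & SPEC =====
-- Pre_ excludes exactly the inputs on which A raises ValueError: a line of length ≥ 2
-- containing a non-digit character (every such position is reached by int() in A and in B).
def Pre_part1 (input : String) : Prop :=
  ∀ bank ∈ (PySem.Str.split? input "\n").getD [],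
    2 ≤ bank.toList.length → bank.toList.all PySem.Chars.isdigit = true
instance (input : String) : Decidable (Pre_part1 input) := by unfold Pre_part1; infer_instance
def pvWitness_part1 : String := "987\n45\n\n3"
def Spec_part1 (input : String) (out : Int) : Prop := out = part1_alt input
instance (input : String) (out : Int) : Decidable (Spec_part1 input out) := by unfold Spec_part1; infer_instance

-- ===== CLAIM (what is proved, stated in full; the proofs are below) =====
def Claim_equal_part1 : Prop := ∀ (input : String), Dom_part1 input → Pre_part1 input → Spec_part1 input (part1 input)

-- ===== LEMMAS AND PROOFS =====

-- digit value of a character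
def pvDv (c : Char) : Int := (c.toNat : Int) - 48

-- per-line value of A, as a function of the line's characters
def pvLA (cs : List Char) : Int :=
  let st := (PySem.List.pyRange 0 (PySem.List.len cs - 1) 1).foldl
    (fun (st : Int × Int) i =>
      let d := (PySem.Int.ofChars? [PySem.List.pyGetD cs i ' ']).getD 0
      if d > st.1 then (d, i) else st) (0, 0)
  let sb := (PySem.List.pyRange (st.2 + 1) (PySem.List.len cs) 1).foldl
    (fun sb i =>
      let d := (PySem.Int.ofChars? [PySem.List.pyGetD cs i ' ']).getD 0
      if d > sb then d else sb) 0
  (PySem.Int.ofStr? (PySem.Int.toStr st.1 ++ PySem.Int.toStr sb)).getD 0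

-- per-line value of B
def pvLB (cs : List Char) : Int :=
  (PySem.List.pyRange 0 (PySem.List.len cs - 1) 1).foldl
    (fun best i =>
      (PySem.List.pyRange (i + 1) (PySem.List.len cs) 1).foldl
        (fun best j =>
          let joltage := 10 * (PySem.Int.ofChars? [PySem.List.pyGetD cs i ' ']).getD 0
            + (PySem.Int.ofChars? [PySem.List.pyGetD cs j ' ']).getD 0
          if joltage > best then joltage else best) best) 0

theorem pvA_eq (input : String) :
    part1 input = ((PySem.Str.split? input "\n").getD []).foldl
      (fun t b => t + pvLA b.toList) 0 := rfl

theorem pvB_eq (input : String) :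
    part1_alt input = ((PySem.Str.split? input "\n").getD []).foldl
      (fun t b => t + pvLB b.toList) 0 := rfl

theorem pvChEq (c : Char) (k : Nat) (h : c.toNat = k) (d : Char) (hd : d.toNat = k) : c = d := by
  apply Char.ext; exact UInt32.toNat_inj.mp (h.trans hd.symm)

theorem pvDigitBounds (c : Char) (h : PySem.Chars.isdigit c = true) : 0 ≤ pvDv c ∧ pvDv c ≤ 9 := by
  simp only [PySem.Chars.isdigit, Bool.and_eq_true, decide_eq_true_eq, Char.le_def] at h
  have h1 : (48:Nat) ≤ c.toNat := UInt32.le_iff_toNat_le.mp h.1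
  have h2 : c.toNat ≤ 57 := UInt32.le_iff_toNat_le.mp h.2
  unfold pvDv; omega

theorem pvDigitVal (c : Char) (h : PySem.Chars.isdigit c = true) :
    PySem.Int.ofChars? [c] = some (pvDv c) := by
  simp only [PySem.Chars.isdigit, Bool.and_eq_true, decide_eq_true_eq, Char.le_def] at h
  have h1 : (48:Nat) ≤ c.toNat := UInt32.le_iff_toNat_le.mp h.1
  have h2 : c.toNat ≤ 57 := UInt32.le_iff_toNat_le.mp h.2
  interval_cases hk : c.toNat <;>
    first
    | (rw [pvChEq c _ hk '0' (by decide)]; decide)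
    | (rw [pvChEq c _ hk '1' (by decide)]; decide)
    | (rw [pvChEq c _ hk '2' (by decide)]; decide)
    | (rw [pvChEq c _ hk '3' (by decide)]; decide)
    | (rw [pvChEq c _ hk '4' (by decide)]; decide)
    | (rw [pvChEq c _ hk '5' (by decide)]; decide)
    | (rw [pvChEq c _ hk '6' (by decide)]; decide)
    | (rw [pvChEq c _ hk '7' (by decide)]; decide)
    | (rw [pvChEq c _ hk '8' (by decide)]; decide)
    | (rw [pvChEq c _ hk '9' (by decide)]; decide)

-- int(str(a) + str(b)) = 10*a + b for single digits
theorem pvCat (a b : Int) (ha : 0 ≤ a) (ha' : a ≤ 9) (hb : 0 ≤ b) (hb' : b ≤ 9) :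
    (PySem.Int.ofStr? (PySem.Int.toStr a ++ PySem.Int.toStr b)).getD 0 = 10 * a + b := by
  interval_cases a <;> interval_cases b <;> decide

-- the "if d > s then d else s" running maximum
def pvMaxf (s d : Int) : Int := if d > s then d else s

theorem pvMaxFold (l : List Int) (a : Int) :
    a ≤ l.foldl pvMaxf a ∧ (∀ d ∈ l, d ≤ l.foldl pvMaxf a) ∧
    (l.foldl pvMaxf a = a ∨ l.foldl pvMaxf a ∈ l) := by
  induction l generalizing a with
  | nil => simp
  | cons x xs ih =>
    simp only [List.foldl_cons]
    by_cases hx : x > a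
    · rw [show pvMaxf a x = x by simp [pvMaxf, hx]]
      obtain ⟨h1, h2, h3⟩ := ih x
      refine ⟨le_of_lt (lt_of_lt_of_le hx h1), ?_, ?_⟩
      · intro d hd
        rcases List.mem_cons.mp hd with rfl | hd
        · exact h1
        · exact h2 d hd
      · rcases h3 with h | h
        · exact Or.inr (by simp [h])
        · exact Or.inr (List.mem_cons_of_mem _ h)
    · rw [show pvMaxf a x = a by simp [pvMaxf, hx]]
      obtain ⟨h1, h2, h3⟩ := ih a
      refine ⟨h1, ?_, ?_⟩
      · intro d hd
        rcases List.mem_cons.mp hd with rfl | hd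
        · exact le_trans (not_lt.mp hx) h1
        · exact h2 d hd
      · rcases h3 with h | h
        · exact Or.inl h
        · exact Or.inr (List.mem_cons_of_mem _ h)

-- pyRange with Nat endpoints as a mapped List.range
theorem pvRangeCast (a b : Nat) :
    PySem.List.pyRange (a : Int) (b : Int) 1 =
      (List.range (b - a)).map (fun k => ((a + k : Nat) : Int)) := by
  rw [PySem.List.pyRange_one]
  have hab : ((b : Int) - a).toNat = b - a := by omega
  rw [hab]
  apply List.map_congr_left
  intro k _
  push_cast
  ring

theorem pvRangeCast0 (b : Nat) :
    PySem.List.pyRange 0 (b : Int) 1 = (List.range b).map (fun k => ((k : Nat) : Int)) := by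
  have h := pvRangeCast 0 b
  simpa using h

-- first loop: state is (value at p, p) for the first index p of the prefix maximum
theorem pvLoop1 (ds : List Int) (hnn : ∀ k, k < ds.length → 0 ≤ ds.getD k 0) (m : Nat)
    (hm : 1 ≤ m) (hmn : m ≤ ds.length) :
    ∃ p : Nat,
      (List.range m).foldl
        (fun (st : Int × Int) k => if ds.getD k 0 > st.1 then (ds.getD k 0, (k : Int)) else st) (0, 0)
        = (ds.getD p 0, (p : Int)) ∧
      p < m ∧ (∀ k, k < m → ds.getD k 0 ≤ ds.getD p 0) ∧ (∀ k, k < p → ds.getD k 0 < ds.getD p 0) := by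
  induction m with
  | zero => omega
  | succ m ih =>
    by_cases hm1 : m = 0
    · subst hm1
      refine ⟨0, ?_, by omega, ?_, by omega⟩
      · rw [List.range_one]
        simp only [List.foldl_cons, List.foldl_nil]
        by_cases h0 : ds.getD 0 0 > (0 : Int)
        · rw [if_pos h0]
        · rw [if_neg h0]
          have hge := hnn 0 (by omega)
          have h00 : ds.getD 0 0 = 0 := by omega
          rw [h00]
          norm_num
      · intro k hk
        interval_cases k
        exact le_refl _
    · obtain ⟨p, hst, hp, hmax, hstrict⟩ := ih (by omega) (by omega)
      rw [List.range_succ, List.foldl_append, hst]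
      simp only [List.foldl_cons, List.foldl_nil]
      by_cases hgt : ds.getD m 0 > (ds.getD p 0, (p : Int)).1
      · refine ⟨m, by rw [if_pos hgt], by omega, ?_, ?_⟩
        · intro k hk
          rcases Nat.lt_succ_iff_lt_or_eq.mp hk with hk | rfl
          · exact le_of_lt (lt_of_le_of_lt (hmax k hk) hgt)
          · exact le_refl _
        · intro k hk
          exact lt_of_le_of_lt (hmax k hk) hgt
      · refine ⟨p, by rw [if_neg hgt], by omega, ?_, hstrict⟩
        intro k hk
        rcases Nat.lt_succ_iff_lt_or_eq.mp hk with hk | rfl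
        · exact hmax k hk
        · exact not_lt.mp hgt

-- value of the pair (i, j) seen as a two-digit number
def pvPair (ds : List Int) (i j : Nat) : Int := 10 * ds.getD i 0 + ds.getD j 0

-- A's second loop, over digit values
def pvSbfold (ds : List Int) (n p : Nat) : Int :=
  ((List.range (n - (p + 1))).map (fun k => ds.getD (p + 1 + k) 0)).foldl pvMaxf 0

-- B's nested loop, over digit values
def pvBfold (ds : List Int) (n m : Nat) : Int :=
  (List.range m).foldl
    (fun b i => ((List.range (n - (i + 1))).map (fun k => pvPair ds i (i + 1 + k))).foldl pvMaxf b) 0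

theorem pvLoopB (ds : List Int) (n m : Nat) :
    0 ≤ pvBfold ds n m ∧
    (∀ i j, i < m → i < j → j < n → pvPair ds i j ≤ pvBfold ds n m) ∧
    (pvBfold ds n m = 0 ∨ ∃ i j, i < j ∧ j < n ∧ pvBfold ds n m = pvPair ds i j) := by
  induction m with
  | zero => simp [pvBfold]
  | succ m ih =>
    obtain ⟨ih0, ihub, ihat⟩ := ih
    have hstep : pvBfold ds n (m + 1) =
        ((List.range (n - (m + 1))).map (fun k => pvPair ds m (m + 1 + k))).foldl pvMaxf
          (pvBfold ds n m) := by
      unfold pvBfold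
      rw [List.range_succ, List.foldl_append]
      simp only [List.foldl_cons, List.foldl_nil]
    obtain ⟨hle, hub, hat⟩ :=
      pvMaxFold ((List.range (n - (m + 1))).map (fun k => pvPair ds m (m + 1 + k))) (pvBfold ds n m)
    rw [hstep]
    refine ⟨le_trans ih0 hle, ?_, ?_⟩
    · intro i j him hij hjn
      rcases Nat.lt_succ_iff_lt_or_eq.mp him with him | rfl
      · exact le_trans (ihub i j him hij hjn) hle
      · apply hub
        refine List.mem_map.mpr ⟨j - (i + 1), List.mem_range.mpr (by omega), ?_⟩
        have : i + 1 + (j - (i + 1)) = j := by omega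
        rw [this]
    · rcases hat with h | h
      · rw [h]
        exact ihat
      · rcases List.mem_map.mp h with ⟨k, hk, hv⟩
        have hkr := List.mem_range.mp hk
        exact Or.inr ⟨m, m + 1 + k, by omega, by omega, hv.symm⟩

-- the greedy two-pass value equals the brute-force all-pairs maximum
theorem pvGreedyEqBrute (ds : List Int) (n : Nat) (h2 : 2 ≤ n)
    (hb : ∀ k, k < n → 0 ≤ ds.getD k 0 ∧ ds.getD k 0 ≤ 9)
    (p : Nat) (hp : p < n - 1)
    (hmax : ∀ k, k < n - 1 → ds.getD k 0 ≤ ds.getD p 0)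
    (hstrict : ∀ k, k < p → ds.getD k 0 < ds.getD p 0) :
    10 * ds.getD p 0 + pvSbfold ds n p = pvBfold ds n (n - 1) := by
  have hsb_eq : pvSbfold ds n p =
      ((List.range (n - (p + 1))).map (fun k => ds.getD (p + 1 + k) 0)).foldl pvMaxf 0 := rfl
  obtain ⟨hsb0, hsbub, hsbat⟩ :=
    pvMaxFold ((List.range (n - (p + 1))).map (fun k => ds.getD (p + 1 + k) 0)) 0
  obtain ⟨hB0, hBub, hBat⟩ := pvLoopB ds n (n - 1)
  rw [hsb_eq]
  apply le_antisymm
  · -- the greedy value is attained by some pair (p, j), hence ≤ the brute-force max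
    clear hBat
    rcases hsbat with h | h
    · -- suffix max is 0: the entry at p+1 must be 0
      have hk0 : (0 : Nat) ∈ List.range (n - (p + 1)) := List.mem_range.mpr (by omega)
      have hmem : ds.getD (p + 1) 0 ∈
          (List.range (n - (p + 1))).map (fun k => ds.getD (p + 1 + k) 0) :=
        List.mem_map.mpr ⟨0, hk0, by simp⟩
      have h1 := hsbub _ hmem
      have h0 := (hb (p + 1) (by omega)).1
      have hjp : p < p + 1 := by omega
      have hjn : p + 1 < n := by omega
      have hpb := hBub p (p + 1) hp hjp hjn
      unfold pvPair at hpb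
      omega
    · rcases List.mem_map.mp h with ⟨k, hk, hv⟩
      have hkr := List.mem_range.mp hk
      have hjp : p < p + 1 + k := by omega
      have hjn : p + 1 + k < n := by omega
      have hpb := hBub p (p + 1 + k) hp hjp hjn
      unfold pvPair at hpb
      omega
  · -- every pair value is ≤ the greedy value
    clear hsbat
    rcases hBat with h | h
    · rw [h]
      have := (hb p (by omega)).1
      omega
    · rcases h with ⟨i, j, hij, hjn, hvB⟩
      rw [hvB]
      have hi1 : i < n - 1 := by omega
      have hdi := hmax i hi1
      have hdj9 := (hb j (by omega)).2
      have hdj0 := (hb j (by omega)).1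
      have hdp9 := (hb p (by omega)).2
      rcases lt_or_eq_of_le hdi with hlt | heq
      · -- strictly smaller tens digit: dominated
        unfold pvPair
        omega
      · -- equal tens digit: i is at or after p, so ds[j] is in the suffix after p
        have hpi : p ≤ i := by
          by_contra hc
          exact absurd heq (ne_of_lt (hstrict i (by omega)))
        have hkj : j - (p + 1) ∈ List.range (n - (p + 1)) := List.mem_range.mpr (by omega)
        have hj' : p + 1 + (j - (p + 1)) = j := by omega
        have hmem : ds.getD j 0 ∈
            (List.range (n - (p + 1))).map (fun k => ds.getD (p + 1 + k) 0) :=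
          List.mem_map.mpr ⟨j - (p + 1), hkj, by rw [hj']⟩
        have hsj := hsbub _ hmem
        unfold pvPair
        omega

-- the per-line equivalence on an all-digit line
theorem pvLine_eq (cs : List Char) (h : 2 ≤ cs.length → cs.all PySem.Chars.isdigit = true) :
    pvLA cs = pvLB cs := by
  by_cases hn : cs.length ≤ 1
  · match cs, hn with
    | [], _ => decide
    | [c], _ =>
      show pvLA [c] = pvLB [c]
      have h0 : PySem.List.pyRange 0 (PySem.List.len [c] - 1) 1 = [] := by
        apply PySem.List.pyRange_one_eq_nil
        simp
      have h1 : PySem.List.pyRange ((0 : Int) + 1) (PySem.List.len [c]) 1 = [] := by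
        apply PySem.List.pyRange_one_eq_nil
        simp
      unfold pvLA pvLB
      rw [h0]
      simp only [List.foldl_nil]
      rw [h1]
      simp only [List.foldl_nil]
      decide
  · have h2n : 2 ≤ cs.length := by omega
    have hall := h h2n
    have hdig : ∀ k, k < cs.length → PySem.Chars.isdigit (cs.getD k ' ') = true := by
      intro k hk
      rw [List.getD_eq_getElem _ _ hk]
      exact List.all_eq_true.mp hall _ (List.getElem_mem hk)
    set n := cs.length with hn_def
    set ds := cs.map pvDv with hds_def
    have hdslen : ds.length = n := by simp [hds_def, hn_def]
    have hds : ∀ k, k < n → ds.getD k 0 = pvDv (cs.getD k ' ') := by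
      intro k hk
      rw [List.getD_eq_getElem ds 0 (by omega), List.getD_eq_getElem cs ' ' hk]
      simp [hds_def]
    have hb : ∀ k, k < n → 0 ≤ ds.getD k 0 ∧ ds.getD k 0 ≤ 9 := by
      intro k hk
      rw [hds k hk]
      exact pvDigitBounds _ (hdig k hk)
    have hnn : ∀ k, k < ds.length → 0 ≤ ds.getD k 0 := fun k hk => (hb k (by omega)).1
    have hlencs : PySem.List.len cs = (n : Int) := by simp [hn_def]
    have hrange1 : PySem.List.pyRange 0 (PySem.List.len cs - 1) 1 =
        (List.range (n - 1)).map (fun k => ((k : Nat) : Int)) := by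
      rw [hlencs, show (n : Int) - 1 = ((n - 1 : Nat) : Int) by omega]
      exact pvRangeCast0 (n - 1)
    -- pointwise: the character-level loop bodies compute the digit values
    have hgetd : ∀ k : Nat, k < n →
        (PySem.Int.ofChars? [PySem.List.pyGetD cs (k : Int) ' ']).getD 0 = ds.getD k 0 := by
      intro k hk
      rw [PySem.List.pyGetD_natCast]
      rw [pvDigitVal _ (hdig k hk)]
      rw [hds k hk]
      rfl
    obtain ⟨p, hst, hp, hmax, hstrict⟩ := pvLoop1 ds hnn (n - 1) (by omega) (by omega)
    -- ===== A side =====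
    have hXA : (PySem.List.pyRange 0 (PySem.List.len cs - 1) 1).foldl
        (fun (st : Int × Int) i =>
          let d := (PySem.Int.ofChars? [PySem.List.pyGetD cs i ' ']).getD 0
          if d > st.1 then (d, i) else st) (0, 0) = (ds.getD p 0, (p : Int)) := by
      rw [hrange1, List.foldl_map]
      rw [PySem.List.foldl_congr_mem _ _
        (fun (st : Int × Int) (k : Nat) => if ds.getD k 0 > st.1 then (ds.getD k 0, (k : Int)) else st)
        (0, 0) ?_]
      · exact hst
      · intro acc k hk
        have hkn : k < n := by
          have := List.mem_range.mp hk
          omega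
        simp only [hgetd k hkn]
    have hXS : (PySem.List.pyRange ((p : Int) + 1) (PySem.List.len cs) 1).foldl
        (fun sb i =>
          let d := (PySem.Int.ofChars? [PySem.List.pyGetD cs i ' ']).getD 0
          if d > sb then d else sb) 0 = pvSbfold ds n p := by
      rw [hlencs, show (p : Int) + 1 = ((p + 1 : Nat) : Int) by push_cast; ring]
      rw [pvRangeCast (p + 1) n, List.foldl_map]
      rw [PySem.List.foldl_congr_mem _ _
        (fun (sb : Int) (k : Nat) => pvMaxf sb (ds.getD (p + 1 + k) 0)) 0 ?_]
      · exact (List.foldl_map).symm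
      · intro acc k hk
        have hkn : p + 1 + k < n := by
          have := List.mem_range.mp hk
          omega
        simp only [hgetd (p + 1 + k) hkn, pvMaxf]
    have hA : pvLA cs = 10 * ds.getD p 0 + pvSbfold ds n p := by
      show (PySem.Int.ofStr? (PySem.Int.toStr ((PySem.List.pyRange 0 (PySem.List.len cs - 1) 1).foldl
          (fun (st : Int × Int) i =>
            let d := (PySem.Int.ofChars? [PySem.List.pyGetD cs i ' ']).getD 0
            if d > st.1 then (d, i) else st) (0, 0)).1 ++
        PySem.Int.toStr ((PySem.List.pyRange (((PySem.List.pyRange 0 (PySem.List.len cs - 1) 1).foldl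
          (fun (st : Int × Int) i =>
            let d := (PySem.Int.ofChars? [PySem.List.pyGetD cs i ' ']).getD 0
            if d > st.1 then (d, i) else st) (0, 0)).2 + 1) (PySem.List.len cs) 1).foldl
          (fun sb i =>
            let d := (PySem.Int.ofChars? [PySem.List.pyGetD cs i ' ']).getD 0
            if d > sb then d else sb) 0))).getD 0 = 10 * ds.getD p 0 + pvSbfold ds n p
      rw [hXA]
      simp only
      rw [hXS]
      have hsb_eq : pvSbfold ds n p =
          ((List.range (n - (p + 1))).map (fun k => ds.getD (p + 1 + k) 0)).foldl pvMaxf 0 := rfl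
      have hsbB := pvMaxFold ((List.range (n - (p + 1))).map (fun k => ds.getD (p + 1 + k) 0)) 0
      have hsb0 : 0 ≤ pvSbfold ds n p := by rw [hsb_eq]; exact hsbB.1
      have hsb9 : pvSbfold ds n p ≤ 9 := by
        rw [hsb_eq]
        rcases hsbB.2.2 with h | h
        · rw [h]; norm_num
        · rcases List.mem_map.mp h with ⟨k, hk, hv⟩
          have hkr := List.mem_range.mp hk
          rw [← hv]
          exact (hb (p + 1 + k) (by omega)).2
      exact pvCat _ _ (hb p (by omega)).1 (hb p (by omega)).2 hsb0 hsb9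
    -- ===== B side =====
    have hB : pvLB cs = pvBfold ds n (n - 1) := by
      unfold pvLB
      rw [hrange1, List.foldl_map]
      rw [PySem.List.foldl_congr_mem _ _
        (fun (b : Int) (i : Nat) =>
          ((List.range (n - (i + 1))).map (fun k => pvPair ds i (i + 1 + k))).foldl pvMaxf b) 0 ?_]
      · rfl
      · intro acc i hi
        have hin : i < n - 1 := List.mem_range.mp hi
        rw [hlencs, show (i : Int) + 1 = ((i + 1 : Nat) : Int) by push_cast; ring]
        rw [pvRangeCast (i + 1) n, List.foldl_map]
        rw [PySem.List.foldl_congr_mem _ _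
          (fun (b : Int) (k : Nat) => pvMaxf b (pvPair ds i (i + 1 + k))) acc ?_]
        · exact (List.foldl_map).symm
        · intro acc2 k hk
          have hkn : i + 1 + k < n := by
            have := List.mem_range.mp hk
            omega
          simp only [hgetd (i + 1 + k) hkn, hgetd i (by omega), pvMaxf, pvPair]
    rw [hA, hB]
    exact pvGreedyEqBrute ds n h2n hb p hp hmax hstrict

theorem pv_main (input : String) (hpre : Pre_part1 input) : part1 input = part1_alt input := by
  rw [pvA_eq, pvB_eq]
  apply PySem.List.foldl_congr_mem
  intro acc bank hbank
  rw [pvLine_eq bank.toList]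
  intro h2
  simpa using hpre bank hbank h2

-- ===== VERDICT (by name: the statement is the Claim_ definition above) =====
theorem part1_spec : Claim_equal_part1 := by
  intro input _ hpre
  unfold Spec_part1
  exact pv_main input hpre
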